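-- pv_equiv track=rewrite | github.com/neduzze/ComportSniffer | port_sniffer.py | print_cmd
-- ===== SOURCE A (Python) =====
-- def print_cmd(cmd: list[int]) -> str:
--     out_str = ""
--     max_len = 16
--     for c, v in enumerate(cmd):
--         if 0 == c % max_len and 0 < c:
--             out_str += f"\n"
--         out_str += f"{v:02X} "
--     return out_str
-- ===== SOURCE B (Python) =====
-- def print_cmd(cmd: list[int]) -> str:
--     chunks = [cmd[i:i + 16] for i in range(0, len(cmd), 16)]
--     return "\n".join("".join(f"{v:02X} " for v in chunk) for chunk in chunks)
-- ===== Notes on version B (the rewrite author's own statement) =====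
-- stated objective: idiomatic
-- what changed: Replaces the running modulo-counter single pass that interleaves newline decisions with a partition-into-16-chunks then two-level join ('\n'.join of ''.join per chunk).
import Mathlib
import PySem

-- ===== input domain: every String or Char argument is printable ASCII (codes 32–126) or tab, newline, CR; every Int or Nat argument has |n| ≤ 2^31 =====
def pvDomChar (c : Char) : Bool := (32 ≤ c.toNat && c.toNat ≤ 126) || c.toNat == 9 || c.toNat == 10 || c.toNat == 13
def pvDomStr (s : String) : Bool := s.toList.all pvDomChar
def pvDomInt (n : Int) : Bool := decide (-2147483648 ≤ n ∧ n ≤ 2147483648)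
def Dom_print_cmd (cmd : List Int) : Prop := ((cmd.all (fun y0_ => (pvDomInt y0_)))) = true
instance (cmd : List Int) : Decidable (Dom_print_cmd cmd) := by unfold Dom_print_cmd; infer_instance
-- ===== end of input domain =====

-- B formats the list by partitioning it into 16-element chunks and joining per-chunk strings,
-- instead of A's single pass with a modulo counter deciding where newlines go (idiomatic rewrite, same cost).


-- ===== PORT A =====
-- shared helper: Python's f"{v:02X}" (uppercase hex, zero-padded to width 2, sign counted in the width)
def pvHexDigit (d : Nat) : Char := if d < 10 then Char.ofNat (48 + d) else Char.ofNat (55 + d)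

def pvHexDigits (n : Nat) : List Char :=
  if _h : n < 16 then [pvHexDigit n]
  else pvHexDigits (n / 16) ++ [pvHexDigit (n % 16)]
  decreasing_by exact Nat.div_lt_self (by omega) (by omega)

def pvFmt02X (v : Int) : String :=
  if v < 0 then String.mk ('-' :: pvHexDigits (-v).toNat)
  else String.mk (if (pvHexDigits v.toNat).length < 2 then '0' :: pvHexDigits v.toNat else pvHexDigits v.toNat)

def print_cmd (cmd : List Int) : String :=
  (PySem.List.enumerate cmd 0).foldl
    (fun out_str cv =>
      (if PySem.Int.mod cv.1 16 = 0 ∧ 0 < cv.1 then out_str ++ "\n" else out_str) ++ (pvFmt02X cv.2 ++ " "))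
    ""

-- ===== PORT B =====
def pvLine (chunk : List Int) : String :=
  PySem.Str.join "" (chunk.map (fun v => pvFmt02X v ++ " "))

def print_cmd_alt (cmd : List Int) : String :=
  let chunks := (PySem.List.pyRange 0 (PySem.List.len cmd) 16).map
    (fun i => PySem.List.slice cmd (some i) (some (i + 16)))
  PySem.Str.join "\n" (chunks.map pvLine)

-- ===== PRECONDITION & SPEC =====
def Spec_print_cmd (cmd : List Int) (out : String) : Prop := out = print_cmd_alt cmd
instance (cmd : List Int) (out : String) : Decidable (Spec_print_cmd cmd out) := by unfold Spec_print_cmd; infer_instance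

-- ===== CLAIM (what is proved, stated in full; the proofs are below) =====
def Claim_equal_print_cmd : Prop := ∀ (cmd : List Int), Dom_print_cmd cmd → Spec_print_cmd cmd (print_cmd cmd)

-- ===== LEMMAS AND PROOFS =====

-- A's loop step and its tail function (proof-only helpers)
def pvStep (out_str : String) (cv : Int × Int) : String :=
  (if PySem.Int.mod cv.1 16 = 0 ∧ 0 < cv.1 then out_str ++ "\n" else out_str) ++ (pvFmt02X cv.2 ++ " ")

def pvT (s : Int) (xs : List Int) : String := (PySem.List.enumerate xs s).foldl pvStep ""

theorem print_cmd_eq_pvT (cmd : List Int) : print_cmd cmd = pvT 0 cmd := rfl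

theorem pvMod16 (s : Int) (h : 0 ≤ s) : PySem.Int.mod s 16 = s % 16 := by
  simp [PySem.Int.mod, Int.fmod_eq_emod]

theorem pvT_acc (xs : List Int) (s : Int) (acc : String) :
    (PySem.List.enumerate xs s).foldl pvStep acc = acc ++ pvT s xs := by
  induction xs generalizing s acc with
  | nil => simp [pvT, PySem.List.enumerate_nil]
  | cons x xs ih =>
    simp only [pvT, PySem.List.enumerate_cons, List.foldl_cons]
    rw [ih, ih]
    have : pvStep acc (s, x) = acc ++ pvStep "" (s, x) := by
      simp only [pvStep]
      split <;> simp [String.append_assoc, String.empty_append]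
    rw [this, String.append_assoc]

theorem pvT_cons (x : Int) (xs : List Int) (s : Int) :
    pvT s (x :: xs) = pvStep "" (s, x) ++ pvT (s + 1) xs := by
  simp only [pvT, PySem.List.enumerate_cons, List.foldl_cons]
  exact pvT_acc xs (s + 1) (pvStep "" (s, x))

theorem pvT_shift (xs : List Int) (s : Int) (h : 1 ≤ s) : pvT (s + 16) xs = pvT s xs := by
  induction xs generalizing s with
  | nil => rfl
  | cons x xs ih =>
    rw [pvT_cons, pvT_cons]
    have hc : (PySem.Int.mod (s + 16) 16 = 0 ∧ 0 < s + 16) ↔ (PySem.Int.mod s 16 = 0 ∧ 0 < s) := by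
      rw [pvMod16 _ (by omega), pvMod16 _ (by omega)]
      omega
    have hstep : pvStep "" (s + 16, x) = pvStep "" (s, x) := by
      simp only [pvStep]
      by_cases hco : PySem.Int.mod s 16 = 0 ∧ 0 < s
      · rw [if_pos hco, if_pos (hc.mpr hco)]
      · rw [if_neg hco, if_neg (fun hh => hco (hc.mp hh))]
    rw [hstep]
    have := ih (s + 1) (by omega)
    rw [show s + 16 + 1 = s + 1 + 16 by ring, this]

-- flat per-element concatenation (what one line is)
def pvJoinFmt : List Int → String
  | [] => ""
  | x :: xs => (pvFmt02X x ++ " ") ++ pvJoinFmt xs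

theorem pvT_line (xs : List Int) (s : Int) (h0 : 0 ≤ s) (h16 : s + xs.length ≤ 16) :
    pvT s xs = pvJoinFmt xs := by
  induction xs generalizing s with
  | nil => rfl
  | cons x xs ih =>
    rw [pvT_cons]
    have hlen : (0:Int) ≤ xs.length := by positivity
    have hcond : ¬ (PySem.Int.mod s 16 = 0 ∧ 0 < s) := by
      rw [pvMod16 _ h0]
      simp only [List.length_cons] at h16
      push_cast at h16
      omega
    simp only [pvStep, if_neg hcond, String.empty_append, pvJoinFmt]
    rw [ih (s + 1) (by omega) (by simp only [List.length_cons] at h16; push_cast at h16 ⊢; omega)]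

theorem pvLine_nil : pvLine [] = "" := by
  rw [← String.toList_inj]
  simp [pvLine, PySem.Str.toList_join, PySem.Chars.join_nil]

theorem pvLine_cons (x : Int) (xs : List Int) :
    pvLine (x :: xs) = (pvFmt02X x ++ " ") ++ pvLine xs := by
  cases xs with
  | nil =>
    rw [← String.toList_inj]
    simp [pvLine, PySem.Str.toList_join, PySem.Chars.join_singleton, PySem.Chars.join_nil,
      String.toList_append]
  | cons y ys =>
    rw [← String.toList_inj]
    simp only [pvLine, List.map_cons, PySem.Str.toList_join, PySem.Chars.join_cons_cons,
      String.toList_append]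
    simp

theorem pvLine_eq_joinFmt (xs : List Int) : pvLine xs = pvJoinFmt xs := by
  induction xs with
  | nil => exact pvLine_nil
  | cons x xs ih => rw [pvLine_cons, ih]; rfl

theorem pvT16 (xs : List Int) (hne : xs ≠ []) : pvT 16 xs = "\n" ++ pvT 0 xs := by
  cases xs with
  | nil => exact absurd rfl hne
  | cons x xs =>
    rw [pvT_cons, pvT_cons]
    have h1 : pvStep "" ((16:Int), x) = "\n" ++ pvStep "" ((0:Int), x) := by
      simp only [pvStep]
      rw [if_pos (by rw [pvMod16 _ (by omega)]; omega), if_neg (by omega)]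
      simp [String.empty_append]
    rw [h1, show (16:Int) + 1 = 1 + 16 from by ring, pvT_shift xs 1 (le_refl 1),
      String.append_assoc]
    norm_num

-- B-side: the chunk list is (range m).map (pvChunkFn xs)
def pvChunkFn (xs : List Int) (k : Nat) : List Int := (xs.drop (16 * k)).take 16

theorem pvMapChunks (xs : List Int) (m : Nat) :
    ((List.range m).map (fun k : Nat => (0:Int) + 16 * (k : Int))).map
        (fun i => PySem.List.slice xs (some i) (some (i + 16)))
      = (List.range m).map (pvChunkFn xs) := by
  rw [List.map_map]
  have hf : ((fun i => PySem.List.slice xs (some i) (some (i + 16))) ∘ (fun k : Nat => (0:Int) + 16 * (k : Int)))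
      = pvChunkFn xs := by
    funext k
    simp only [Function.comp]
    have e3 : (0:Int) + 16 * (k : Int) = ((16 * k : Nat) : Int) := by push_cast; ring
    have e4 : (0:Int) + 16 * (k : Int) + 16 = ((16 * k + 16 : Nat) : Int) := by push_cast; ring
    rw [e4, e3, PySem.List.slice_natCast, pvChunkFn]
    congr 1
    omega
  rw [hf]

theorem pvAlt_eq (xs : List Int) (hne : xs ≠ []) :
    print_cmd_alt xs
      = PySem.Str.join "\n" (((List.range (((xs.length : Int) + 15) / 16).toNat).map (pvChunkFn xs)).map pvLine) := by
  simp only [print_cmd_alt, PySem.List.len_eq]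
  rw [PySem.List.pyRange_of_pos (0:Int) (xs.length : Int) (by norm_num : (0:Int) < 16)]
  rw [if_pos (by exact_mod_cast List.length_pos_iff.mpr hne)]
  rw [pvMapChunks]
  have hcount : ((xs.length : Int) - 0 + 16 - 1) = (xs.length : Int) + 15 := by ring
  rw [hcount]

theorem pvAlt_nil : print_cmd_alt [] = "" := by
  rw [← String.toList_inj]
  simp [print_cmd_alt, PySem.List.pyRange_of_pos (0:Int) 0 (by norm_num : (0:Int) < 16),
    PySem.Str.toList_join, PySem.Chars.join_nil]

theorem pvAlt_short (xs : List Int) (hne : xs ≠ []) (hlen : xs.length ≤ 16) :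
    print_cmd_alt xs = pvLine xs := by
  have h1 : 1 ≤ xs.length := List.length_pos_iff.mpr hne
  rw [pvAlt_eq xs hne]
  have hm : (((xs.length : Int) + 15) / 16).toNat = 1 := by omega
  rw [hm]
  have hchunk : pvChunkFn xs 0 = xs := by
    simp [pvChunkFn, List.take_of_length_le hlen]
  rw [List.range_one, List.map_singleton, List.map_singleton, hchunk]
  rw [← String.toList_inj]
  simp [PySem.Str.toList_join, PySem.Chars.join_singleton]

theorem pvAlt_step (xs : List Int) (hlen : 16 < xs.length) :
    print_cmd_alt xs = pvLine (xs.take 16) ++ "\n" ++ print_cmd_alt (xs.drop 16) := by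
  have hdropne : xs.drop 16 ≠ [] := by
    simp only [ne_eq, List.drop_eq_nil_iff]; omega
  have hdroplen : (xs.drop 16).length = xs.length - 16 := List.length_drop ..
  rw [pvAlt_eq xs (by intro h; rw [h] at hlen; simp at hlen), pvAlt_eq (xs.drop 16) hdropne]
  have hm : (((xs.length : Int) + 15) / 16).toNat
      = ((((xs.drop 16).length : Int) + 15) / 16).toNat + 1 := by
    rw [hdroplen]
    have hcast : ((xs.length - 16 : Nat) : Int) = (xs.length : Int) - 16 := by omega
    rw [hcast]; omega
  rw [hm, List.range_succ_eq_map, List.map_cons, List.map_cons, List.map_map, List.map_map,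
    List.map_map]
  have hc0 : pvChunkFn xs 0 = xs.take 16 := by simp [pvChunkFn]
  have hcs : ((pvLine ∘ pvChunkFn xs) ∘ Nat.succ) = pvLine ∘ pvChunkFn (xs.drop 16) := by
    funext k
    simp only [Function.comp]
    congr 1
    simp only [pvChunkFn, List.drop_drop]
    rw [show 16 * Nat.succ k = 16 + 16 * k from by omega]
  rw [hc0, hcs]
  have hm1 : 1 ≤ ((((xs.drop 16).length : Int) + 15) / 16).toNat := by
    rw [hdroplen]
    have hcast : ((xs.length - 16 : Nat) : Int) = (xs.length : Int) - 16 := by omega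
    rw [hcast]; omega
  obtain ⟨m', hm'⟩ : ∃ m', ((((xs.drop 16).length : Int) + 15) / 16).toNat = m' + 1 :=
    ⟨_, (Nat.succ_pred_eq_of_pos hm1).symm⟩
  rw [hm', List.range_succ_eq_map, List.map_cons]
  rw [← String.toList_inj]
  simp [PySem.Str.toList_join, PySem.Chars.join_cons_cons, String.toList_append]

theorem pv_main (n : Nat) : ∀ (xs : List Int), xs.length ≤ n → print_cmd xs = print_cmd_alt xs := by
  induction n with
  | zero =>
    intro xs h
    rw [List.length_eq_zero_iff.mp (Nat.le_zero.mp h)]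
    rw [pvAlt_nil]; rfl
  | succ n ih =>
    intro xs h
    by_cases hle : xs.length ≤ 16
    · cases hxs : xs with
      | nil => rw [pvAlt_nil]; rfl
      | cons y ys =>
        rw [← hxs, pvAlt_short xs (by rw [hxs]; simp) hle, print_cmd_eq_pvT,
          pvT_line xs 0 (le_refl 0) (by push_cast; omega), pvLine_eq_joinFmt]
    · rw [not_le] at hle
      have hsplit : xs = xs.take 16 ++ xs.drop 16 := (List.take_append_drop 16 xs).symm
      have hdroplen : (xs.drop 16).length ≤ n := by simp only [List.length_drop]; omega
      have hdropne : xs.drop 16 ≠ [] := by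
        simp only [ne_eq, List.drop_eq_nil_iff]; omega
      have htake : (xs.take 16).length = 16 := by simp; omega
      rw [pvAlt_step xs hle, print_cmd_eq_pvT]
      conv_lhs => rw [hsplit]
      show pvT 0 (xs.take 16 ++ xs.drop 16) = _
      rw [pvT, PySem.List.enumerate_append, List.foldl_append]
      have h1 : (PySem.List.enumerate (xs.take 16) 0).foldl pvStep "" = pvT 0 (xs.take 16) := rfl
      rw [h1, pvT_acc]
      rw [show ((0:Int) + ((xs.take 16).length : Int)) = 16 by rw [htake]; norm_num]
      rw [pvT16 (xs.drop 16) hdropne]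
      rw [pvT_line (xs.take 16) 0 (le_refl 0) (by rw [htake]; norm_num), ← pvLine_eq_joinFmt]
      rw [← print_cmd_eq_pvT, ih (xs.drop 16) hdroplen]
      rw [String.append_assoc]

-- ===== VERDICT (by name: the statement is the Claim_ definition above) =====
theorem print_cmd_spec : Claim_equal_print_cmd := by
  intro cmd _
  unfold Spec_print_cmd
  exact pv_main cmd.length cmd (le_refl _)
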